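-- pv_equiv track=rewrite | github.com/afriedman412/municipal-budget-rag | marker_subset_parser.py | make_marker_page_range
-- ===== SOURCE A (Python) =====
-- def make_marker_page_range(target_pages_1idx: list[int], window: int = 5) -> str:
--     """
--     Input pages are 1-indexed from your CSV/PDF.
--     Output is Marker page_range string in 0-indexed form.
--     """
--     selected = set()
--
--     for p in target_pages_1idx:
--         if p is None:
--             continue
--         center = p - 1  # convert to Marker-style 0-index
--         for page in range(max(0, center - window), center + window + 1):
--             selected.add(page)
--
--     if not selected:
--         return ""
--
--     pages = sorted(selected)
--
--     # compress consecutive pages into ranges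
--     ranges = []
--     start = prev = pages[0]
--     for p in pages[1:]:
--         if p == prev + 1:
--             prev = p
--         else:
--             ranges.append(f"{start}-{prev}" if start != prev else str(start))
--             start = prev = p
--     ranges.append(f"{start}-{prev}" if start != prev else str(start))
--
--     return ",".join(ranges)
-- ===== SOURCE B (Python) =====
-- def make_marker_page_range(target_pages_1idx: list[int], window: int = 5) -> str:
--     """
--     Input pages are 1-indexed from your CSV/PDF.
--     Output is Marker page_range string in 0-indexed form.
--     """
--     # one clamped interval per target page, dropping empty ones
--     intervals = []
--     for p in target_pages_1idx:
--         if p is None: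
--             continue
--         c = p - 1
--         lo = max(0, c - window)
--         hi = c + window
--         if lo <= hi:
--             intervals.append((lo, hi))
--
--     intervals = sorted(intervals, key=lambda t: t[0])
--
--     # merge overlapping or adjacent intervals in one scan
--     merged = []
--     cur = None
--     for lo, hi in intervals:
--         if cur is None:
--             cur = (lo, hi)
--         elif lo <= cur[1] + 1:
--             if hi > cur[1]:
--                 cur = (cur[0], hi)
--         else:
--             merged.append(cur)
--             cur = (lo, hi)
--     if cur is not None:
--         merged.append(cur)
--
--     return ",".join(f"{lo}-{hi}" if lo != hi else str(lo) for lo, hi in merged)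
-- ===== Notes on version B (the rewrite author's own statement) =====
-- stated objective: faster
-- what changed: Instead of inserting every page of every window into a set (O(n*window) inserts) and then sorting all covered pages, B builds one clamped interval per target page, sorts the n intervals, merges overlapping/adjacent ones in a single scan and emits the range strings directly.
import Mathlib
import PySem

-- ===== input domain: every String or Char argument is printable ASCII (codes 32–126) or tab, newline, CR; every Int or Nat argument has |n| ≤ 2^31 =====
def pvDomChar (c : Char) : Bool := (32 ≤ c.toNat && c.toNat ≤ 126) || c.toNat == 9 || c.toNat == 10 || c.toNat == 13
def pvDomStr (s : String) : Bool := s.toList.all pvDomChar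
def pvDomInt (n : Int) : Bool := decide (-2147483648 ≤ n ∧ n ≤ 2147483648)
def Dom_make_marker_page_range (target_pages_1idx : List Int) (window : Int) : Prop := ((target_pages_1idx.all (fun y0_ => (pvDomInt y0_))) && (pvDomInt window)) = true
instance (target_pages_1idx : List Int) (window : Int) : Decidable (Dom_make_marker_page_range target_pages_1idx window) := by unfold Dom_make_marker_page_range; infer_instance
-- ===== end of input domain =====

-- B replaces A's page-by-page window expansion (O(n·window) set inserts) by sorting
-- the n per-target intervals and merging overlapping/adjacent ones in one scan.

-- ===== PORT A =====
-- inner loop of A: for page in range(max(0, center-window), center+window+1): selected.add(page)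
def pvWindowAdd (window : Int) (s : PySem.Set Int) (p : Int) : PySem.Set Int :=
  let center := p - 1
  (PySem.List.pyRange (max 0 (center - window)) (center + window + 1) 1).foldl
    (fun s page => PySem.Set.add s page) s

-- f"{start}-{prev}" if start != prev else str(start)
def pvFmt (start prev : Int) : String :=
  if start ≠ prev then PySem.Int.toStr start ++ "-" ++ PySem.Int.toStr prev
  else PySem.Int.toStr start

-- body of A's compression loop; state = (ranges, start, prev)
def pvCompressStep (acc : List String × Int × Int) (p : Int) : List String × Int × Int :=
  if p = acc.2.2 + 1 then (acc.1, acc.2.1, p)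
  else (acc.1 ++ [pvFmt acc.2.1 acc.2.2], p, p)

def make_marker_page_range (target_pages_1idx : List Int) (window : Int) : String :=
  let selected : PySem.Set Int := target_pages_1idx.foldl (pvWindowAdd window) PySem.Set.empty
  if selected = [] then ""
  else
    match PySem.List.sorted selected (fun x => x) false with
    | [] => ""  -- unreachable totality guard: selected is nonempty here
    | p0 :: rest =>
      let st := rest.foldl pvCompressStep ([], p0, p0)
      PySem.Str.join "," (st.1 ++ [pvFmt st.2.1 st.2.2])

-- ===== PORT B =====
-- collect the clamped interval of one target page (dropped when empty)
def pvCollectStep (window : Int) (acc : List (Int × Int)) (p : Int) : List (Int × Int) :=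
  let c := p - 1
  let lo := max 0 (c - window)
  let hi := c + window
  if lo ≤ hi then acc ++ [(lo, hi)] else acc

-- body of B's merge loop; state = (merged, cur)
def pvMergeStep (acc : List (Int × Int) × Option (Int × Int)) (t : Int × Int) :
    List (Int × Int) × Option (Int × Int) :=
  match acc.2 with
  | none => (acc.1, some t)
  | some cur =>
    if t.1 ≤ cur.2 + 1 then
      if cur.2 < t.2 then (acc.1, some (cur.1, t.2)) else (acc.1, some cur)
    else (acc.1 ++ [cur], some t)

-- f"{lo}-{hi}" if lo != hi else str(lo)
def pvEmit (t : Int × Int) : String :=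
  if t.1 ≠ t.2 then PySem.Int.toStr t.1 ++ "-" ++ PySem.Int.toStr t.2
  else PySem.Int.toStr t.1

def make_marker_page_range_alt (target_pages_1idx : List Int) (window : Int) : String :=
  let intervals := target_pages_1idx.foldl (pvCollectStep window) []
  let st := (PySem.List.sorted intervals (fun t => t.1) false).foldl pvMergeStep ([], none)
  let merged := match st.2 with | none => st.1 | some cur => st.1 ++ [cur]
  PySem.Str.join "," (merged.map pvEmit)

-- ===== PRECONDITION & SPEC =====
-- A is total on the domain: no Pre_ is needed.
def Spec_make_marker_page_range (target_pages_1idx : List Int) (window : Int) (out : String) : Prop := out = make_marker_page_range_alt target_pages_1idx window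
instance (target_pages_1idx : List Int) (window : Int) (out : String) : Decidable (Spec_make_marker_page_range target_pages_1idx window out) := by unfold Spec_make_marker_page_range; infer_instance

-- ===== CLAIM (what is proved, stated in full; the proofs are below) =====
def Claim_equal_make_marker_page_range : Prop := ∀ (target_pages_1idx : List Int) (window : Int), Dom_make_marker_page_range target_pages_1idx window → Spec_make_marker_page_range target_pages_1idx window (make_marker_page_range target_pages_1idx window)

-- ===== LEMMAS AND PROOFS =====

-- the set of pages covered by a list of intervals
def pvFlat (M : List (Int × Int)) : List Int :=
  M.flatMap (fun t => PySem.List.pyRange t.1 (t.2 + 1) 1)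

lemma pv_mem_flat (M : List (Int × Int)) (x : Int) :
    x ∈ pvFlat M ↔ ∃ t ∈ M, t.1 ≤ x ∧ x ≤ t.2 := by
  simp only [pvFlat, List.mem_flatMap, PySem.List.mem_pyRange_one]
  constructor
  · rintro ⟨t, ht, h1, h2⟩; exact ⟨t, ht, h1, by omega⟩
  · rintro ⟨t, ht, h1, h2⟩; exact ⟨t, ht, h1, by omega⟩

-- membership in A's selected set
lemma pv_mem_selected (tp : List Int) (window : Int) (s : PySem.Set Int) (x : Int) :
    x ∈ tp.foldl (pvWindowAdd window) s ↔
      x ∈ s ∨ ∃ p ∈ tp, max 0 (p - 1 - window) ≤ x ∧ x ≤ p - 1 + window := by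
  induction tp generalizing s with
  | nil => simp
  | cons p tp ih =>
    simp only [List.foldl_cons, ih, List.mem_cons]
    have hw : x ∈ pvWindowAdd window s p ↔
        x ∈ s ∨ (max 0 (p - 1 - window) ≤ x ∧ x ≤ p - 1 + window) := by
      unfold pvWindowAdd
      rw [show ∀ l s', (l.foldl (fun (s : PySem.Set Int) page => PySem.Set.add s page) s') = PySem.Set.update s' l from fun l s' => rfl]
      simp only [PySem.Set.mem_update, PySem.List.mem_pyRange_one]
      exact or_congr Iff.rfl (by constructor <;> (rintro ⟨h1, h2⟩; exact ⟨by omega, by omega⟩))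
    rw [hw]
    constructor
    · rintro (( h | h) | ⟨q, hq, h⟩)
      · exact Or.inl h
      · exact Or.inr ⟨p, Or.inl rfl, h⟩
      · exact Or.inr ⟨q, Or.inr hq, h⟩
    · rintro (h | ⟨q, (rfl | hq), h⟩)
      · exact Or.inl (Or.inl h)
      · exact Or.inl (Or.inr h)
      · exact Or.inr ⟨q, hq, h⟩

lemma pv_nodup_selected (tp : List Int) (window : Int) (s : PySem.Set Int) (h : s.Nodup) :
    (tp.foldl (pvWindowAdd window) s).Nodup := by
  induction tp generalizing s with
  | nil => simpa using h
  | cons p tp ih =>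
    simp only [List.foldl_cons]
    apply ih
    unfold pvWindowAdd
    rw [show ∀ l s', (l.foldl (fun (s : PySem.Set Int) page => PySem.Set.add s page) s') = PySem.Set.update s' l from fun l s' => rfl]
    exact PySem.Set.nodup_update _ _ h

-- membership in B's interval list
lemma pv_mem_intervals (tp : List Int) (window : Int) (acc : List (Int × Int)) (t : Int × Int) :
    t ∈ tp.foldl (pvCollectStep window) acc ↔
      t ∈ acc ∨ ∃ p ∈ tp, t = (max 0 (p - 1 - window), p - 1 + window) ∧ t.1 ≤ t.2 := by
  induction tp generalizing acc with
  | nil => simp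
  | cons p tp ih =>
    simp only [List.foldl_cons, ih, List.mem_cons]
    unfold pvCollectStep
    simp only []
    split_ifs with hle
    · simp only [List.mem_append, List.mem_singleton]
      constructor
      · rintro ((h | rfl) | ⟨q, hq, h⟩)
        · exact Or.inl h
        · exact Or.inr ⟨p, Or.inl rfl, rfl, by simpa using hle⟩
        · exact Or.inr ⟨q, Or.inr hq, h⟩
      · rintro (h | ⟨q, (rfl | hq), h⟩)
        · exact Or.inl (Or.inl h)
        · exact Or.inl (Or.inr h.1)
        · exact Or.inr ⟨q, hq, h⟩
    · constructor
      · rintro (h | ⟨q, hq, h⟩)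
        · exact Or.inl h
        · exact Or.inr ⟨q, Or.inr hq, h⟩
      · rintro (h | ⟨q, (rfl | hq), h⟩)
        · exact Or.inl h
        · exfalso; rw [h.1] at h; exact hle (by simpa using h.2)
        · exact Or.inr ⟨q, hq, h⟩

-- core merge invariant
lemma pv_merge_fold (I : List (Int × Int)) :
    ∀ (done : List (Int × Int)) (cur : Int × Int),
    (∀ t ∈ I, t.1 ≤ t.2) → I.Pairwise (fun a b => a.1 ≤ b.1) → (∀ t ∈ I, cur.1 ≤ t.1) →
    (∀ a ∈ done, a.1 ≤ a.2) → cur.1 ≤ cur.2 →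
    done.Pairwise (fun a b => a.2 + 2 ≤ b.1) → (∀ a ∈ done, a.2 + 2 ≤ cur.1) →
    ∃ done' cur', I.foldl pvMergeStep (done, some cur) = (done', some cur') ∧
      (∀ a ∈ done', a.1 ≤ a.2) ∧ cur'.1 ≤ cur'.2 ∧
      done'.Pairwise (fun a b => a.2 + 2 ≤ b.1) ∧ (∀ a ∈ done', a.2 + 2 ≤ cur'.1) ∧
      (∀ x, (∃ t ∈ done' ++ [cur'], t.1 ≤ x ∧ x ≤ t.2) ↔
            (∃ t ∈ done ++ [cur], t.1 ≤ x ∧ x ≤ t.2) ∨ ∃ t ∈ I, t.1 ≤ x ∧ x ≤ t.2) := by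
  induction I with
  | nil =>
    intro done cur _ _ _ hvd hvc hpd hdc
    exact ⟨done, cur, rfl, hvd, hvc, hpd, hdc, fun x => by simp⟩
  | cons t I ih =>
    intro done cur hvI hsortI hcurlo hvd hvc hpd hdc
    have hvt : t.1 ≤ t.2 := hvI t (List.mem_cons_self ..)
    have hsort' : I.Pairwise (fun a b => a.1 ≤ b.1) := hsortI.tail
    have htle : ∀ u ∈ I, t.1 ≤ u.1 := fun u hu => (List.pairwise_cons.mp hsortI).1 u hu
    have hvI' : ∀ u ∈ I, u.1 ≤ u.2 := fun u hu => hvI u (List.mem_cons_of_mem _ hu)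
    simp only [List.foldl_cons]
    by_cases hadj : t.1 ≤ cur.2 + 1
    · by_cases hext : cur.2 < t.2
      · -- extend cur to (cur.1, t.2)
        have hstep : pvMergeStep (done, some cur) t = (done, some (cur.1, t.2)) := by
          unfold pvMergeStep; simp [hadj, hext]
        rw [hstep]
        obtain ⟨d', c', heq, h1, h2, h3, h4, h5⟩ :=
          ih done (cur.1, t.2) hvI' hsort'
            (fun u hu => le_trans (hcurlo t (List.mem_cons_self ..)) (htle u hu))
            hvd (by simp; omega) hpd (by simpa using hdc)
        refine ⟨d', c', heq, h1, h2, h3, h4, fun x => ?_⟩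
        rw [h5 x]
        have hc1t : cur.1 ≤ t.1 := hcurlo t (List.mem_cons_self ..)
        constructor
        · rintro (⟨u, hu, h⟩ | ⟨u, hu, h⟩)
          · rcases List.mem_append.mp hu with hu | hu
            · exact Or.inl ⟨u, List.mem_append_left _ hu, h⟩
            · rw [List.mem_singleton] at hu; rw [hu] at h
              by_cases hx : x ≤ cur.2
              · exact Or.inl ⟨cur, List.mem_append_right _ (by simp), by simp at h; omega⟩
              · exact Or.inr ⟨t, List.mem_cons_self .., by simp at h; omega⟩
          · exact Or.inr ⟨u, List.mem_cons_of_mem _ hu, h⟩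
        · rintro (⟨u, hu, h⟩ | ⟨u, hu, h⟩)
          · rcases List.mem_append.mp hu with hu | hu
            · exact Or.inl ⟨u, List.mem_append_left _ hu, h⟩
            · rw [List.mem_singleton] at hu; rw [hu] at h
              exact Or.inl ⟨(cur.1, t.2), List.mem_append_right _ (by simp), by simp; omega⟩
          · rcases List.mem_cons.mp hu with rfl | hu
            · exact Or.inl ⟨(cur.1, u.2), List.mem_append_right _ (by simp), by simp; omega⟩
            · exact Or.inr ⟨u, hu, h⟩
      · -- t contained in cur: keep cur
        have hstep : pvMergeStep (done, some cur) t = (done, some cur) := by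
          unfold pvMergeStep; simp [hadj, hext]
        rw [hstep]
        obtain ⟨d', c', heq, h1, h2, h3, h4, h5⟩ :=
          ih done cur hvI' hsort' (fun u hu => le_trans (hcurlo t (List.mem_cons_self ..)) (htle u hu))
            hvd hvc hpd hdc
        refine ⟨d', c', heq, h1, h2, h3, h4, fun x => ?_⟩
        rw [h5 x]
        have hc1t : cur.1 ≤ t.1 := hcurlo t (List.mem_cons_self ..)
        rw [not_lt] at hext
        constructor
        · rintro (h | ⟨u, hu, h⟩)
          · exact Or.inl h
          · exact Or.inr ⟨u, List.mem_cons_of_mem _ hu, h⟩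
        · rintro (h | ⟨u, hu, h⟩)
          · exact Or.inl h
          · rcases List.mem_cons.mp hu with rfl | hu
            · exact Or.inl ⟨cur, List.mem_append_right _ (by simp), by omega⟩
            · exact Or.inr ⟨u, hu, h⟩
    · -- gap: push cur, start t
      have hstep : pvMergeStep (done, some cur) t = (done ++ [cur], some t) := by
        unfold pvMergeStep; simp [hadj]
      rw [hstep]
      obtain ⟨d', c', heq, h1, h2, h3, h4, h5⟩ :=
        ih (done ++ [cur]) t hvI' hsort' htle
          (by intro a ha; rcases List.mem_append.mp ha with ha | ha
              · exact hvd a ha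
              · simp at ha; subst ha; exact hvc)
          hvt
          (by rw [List.pairwise_append]
              exact ⟨hpd, List.pairwise_singleton .., by intro a ha b hb; simp at hb; subst hb; exact hdc a ha⟩)
          (by intro a ha; rcases List.mem_append.mp ha with ha | ha
              · have := hdc a ha; omega
              · simp at ha; subst ha; omega)
      refine ⟨d', c', heq, h1, h2, h3, h4, fun x => ?_⟩
      rw [h5 x]
      constructor
      · rintro (⟨u, hu, h⟩ | ⟨u, hu, h⟩)
        · rcases List.mem_append.mp hu with hu | hu
          · exact Or.inl ⟨u, hu, h⟩
          · rw [List.mem_singleton] at hu; rw [hu] at h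
            exact Or.inr ⟨t, List.mem_cons_self .., h⟩
        · exact Or.inr ⟨u, List.mem_cons_of_mem _ hu, h⟩
      · rintro (⟨u, hu, h⟩ | ⟨u, hu, h⟩)
        · exact Or.inl ⟨u, List.mem_append_left _ hu, h⟩
        · rcases List.mem_cons.mp hu with rfl | hu
          · exact Or.inl ⟨u, List.mem_append_right _ (by simp), h⟩
          · exact Or.inr ⟨u, hu, h⟩

-- pvFlat of a valid, separated interval list is strictly increasing
lemma pv_flat_pairwise (M : List (Int × Int)) (hv : ∀ t ∈ M, t.1 ≤ t.2)
    (hs : M.Pairwise (fun a b => a.2 + 2 ≤ b.1)) : (pvFlat M).Pairwise (· < ·) := by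
  induction M with
  | nil => simp [pvFlat]
  | cons t M ih =>
    have hsep : ∀ u ∈ M, t.2 + 2 ≤ u.1 := fun u hu => (List.pairwise_cons.mp hs).1 u hu
    have hvM : ∀ u ∈ M, u.1 ≤ u.2 := fun u hu => hv u (List.mem_cons_of_mem _ hu)
    show ((PySem.List.pyRange t.1 (t.2+1) 1) ++ pvFlat M).Pairwise (· < ·)
    rw [List.pairwise_append]
    refine ⟨PySem.List.pairwise_lt_pyRange_one .., ih hvM hs.tail, ?_⟩
    intro a ha b hb
    rw [PySem.List.mem_pyRange_one] at ha
    rw [pv_mem_flat] at hb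
    obtain ⟨u, hu, hb1, hb2⟩ := hb
    have := hsep u hu
    omega

-- A's compression loop over one contiguous run keeps (ranges, start) and moves prev
lemma pv_run (n : Nat) : ∀ (ranges : List String) (start prev : Int),
    (PySem.List.pyRange (prev + 1) (prev + 1 + n) 1).foldl pvCompressStep (ranges, start, prev)
      = (ranges, start, prev + n) := by
  induction n with
  | zero =>
    intro ranges start prev
    rw [PySem.List.pyRange_one_eq_nil (by omega)]
    simp
  | succ n ih =>
    intro ranges start prev
    rw [PySem.List.pyRange_one_cons (by omega)]
    simp only [List.foldl_cons]
    have hstep : pvCompressStep (ranges, start, prev) (prev + 1) = (ranges, start, prev + 1) := by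
      unfold pvCompressStep; simp
    rw [hstep]
    rw [show (prev + 1 + (↑(n+1)) : Int) = (prev + 1) + 1 + ↑n by push_cast; omega]
    rw [ih ranges start (prev + 1)]
    congr 2
    push_cast; omega

-- A's compression of a flattened valid separated list emits one range string per interval
lemma pv_compress_flat (M : List (Int × Int)) :
    ∀ (ranges : List String) (start prev : Int),
    (∀ t ∈ M, t.1 ≤ t.2) → M.Pairwise (fun a b => a.2 + 2 ≤ b.1) → (∀ t ∈ M, prev + 2 ≤ t.1) →
    (let st := (pvFlat M).foldl pvCompressStep (ranges, start, prev)
     st.1 ++ [pvFmt st.2.1 st.2.2]) = ranges ++ [pvFmt start prev] ++ M.map pvEmit := by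
  induction M with
  | nil => intro ranges start prev _ _ _; simp [pvFlat]
  | cons t M ih =>
    intro ranges start prev hv hs hprev
    have hvt : t.1 ≤ t.2 := hv t (List.mem_cons_self ..)
    have hpt : prev + 2 ≤ t.1 := hprev t (List.mem_cons_self ..)
    show (let st := ((PySem.List.pyRange t.1 (t.2+1) 1 ++ pvFlat M).foldl pvCompressStep (ranges, start, prev));
          st.1 ++ [pvFmt st.2.1 st.2.2]) = _
    rw [List.foldl_append]
    rw [PySem.List.pyRange_one_cons (by omega)]
    simp only [List.foldl_cons]
    have hstep : pvCompressStep (ranges, start, prev) t.1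
        = (ranges ++ [pvFmt start prev], t.1, t.1) := by
      unfold pvCompressStep
      simp only []
      rw [if_neg (by omega)]
    rw [hstep]
    rw [show (t.2 + 1 : Int) = t.1 + 1 + ((t.2 - t.1).toNat : Int) by omega]
    rw [pv_run (t.2 - t.1).toNat (ranges ++ [pvFmt start prev]) t.1 t.1]
    rw [show (t.1 + ((t.2 - t.1).toNat : Int)) = t.2 by omega]
    have := ih (ranges ++ [pvFmt start prev]) t.1 t.2
      (fun u hu => hv u (List.mem_cons_of_mem _ hu)) hs.tail
      (fun u hu => (List.pairwise_cons.mp hs).1 u hu)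
    simp only [] at this ⊢
    rw [this]
    have hemit : pvEmit t = pvFmt t.1 t.2 := rfl
    simp [hemit, List.append_assoc]

-- ===== VERDICT (by name: the statement is the Claim_ definition above) =====
theorem make_marker_page_range_spec : Claim_equal_make_marker_page_range := by
  intro tp window _
  unfold Spec_make_marker_page_range
  -- coverage of A's selected set by B's interval list
  have hcov : ∀ x : Int, x ∈ tp.foldl (pvWindowAdd window) PySem.Set.empty ↔
      ∃ t ∈ tp.foldl (pvCollectStep window) ([] : List (Int × Int)), t.1 ≤ x ∧ x ≤ t.2 := by
    intro x
    rw [pv_mem_selected]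
    constructor
    · rintro (h | ⟨p, hp, h1, h2⟩)
      · exact absurd h (by simp [PySem.Set.empty])
      · refine ⟨(max 0 (p-1-window), p-1+window), ?_, by simpa using h1, by simpa using h2⟩
        rw [pv_mem_intervals]
        exact Or.inr ⟨p, hp, rfl, by simp; omega⟩
    · rintro ⟨t, ht, h1, h2⟩
      rw [pv_mem_intervals] at ht
      rcases ht with ht | ⟨p, hp, rfl, hv⟩
      · exact absurd ht (by simp)
      · exact Or.inr ⟨p, hp, by simpa using h1, by simpa using h2⟩
  rcases hSI : PySem.List.sorted (tp.foldl (pvCollectStep window) []) (fun t => t.1) false with _ | ⟨t0, I⟩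
  · -- no intervals at all: both sides return ""
    have hint : tp.foldl (pvCollectStep window) ([] : List (Int × Int)) = [] := by
      have hp := PySem.List.sorted_perm (tp.foldl (pvCollectStep window) []) (fun t => t.1) false
      rw [hSI] at hp
      exact hp.symm.eq_nil
    have hsel : tp.foldl (pvWindowAdd window) PySem.Set.empty = [] := by
      rw [List.eq_nil_iff_forall_not_mem]
      intro x hx
      obtain ⟨t, ht, _⟩ := (hcov x).mp hx
      rw [hint] at ht
      simp at ht
    have hA : make_marker_page_range tp window = "" := by
      unfold make_marker_page_range
      dsimp only
      rw [if_pos hsel]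
    have hB : make_marker_page_range_alt tp window = "" := by
      unfold make_marker_page_range_alt
      dsimp only
      rw [hSI]
      rfl
    rw [hA, hB]
  · -- at least one interval
    have hmemS : ∀ t, t ∈ (t0 :: I) ↔ t ∈ tp.foldl (pvCollectStep window) ([] : List (Int × Int)) := by
      intro t; rw [← hSI, PySem.List.mem_sorted]
    have hvs : ∀ t ∈ (t0 :: I), t.1 ≤ t.2 := by
      intro t ht
      rcases (pv_mem_intervals tp window [] t).mp ((hmemS t).mp ht) with h | ⟨p, _, _, h⟩
      · exact absurd h (by simp)
      · exact h
    have hps : (t0 :: I).Pairwise (fun a b => a.1 ≤ b.1) := by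
      rw [← hSI]; exact PySem.List.sorted_pairwise ..
    obtain ⟨done', cur', heq, h1, h2, h3, h4, h5⟩ :=
      pv_merge_fold I [] t0
        (fun u hu => hvs u (List.mem_cons_of_mem _ hu)) hps.tail
        (fun u hu => (List.pairwise_cons.mp hps).1 u hu)
        (by simp) (hvs t0 (List.mem_cons_self ..)) (List.Pairwise.nil) (by simp)
    -- the merged list and its properties
    have hvm : ∀ a ∈ done' ++ [cur'], a.1 ≤ a.2 := by
      intro a ha
      rcases List.mem_append.mp ha with ha | ha
      · exact h1 a ha
      · rw [List.mem_singleton] at ha; subst ha; exact h2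
    have hsm : (done' ++ [cur']).Pairwise (fun a b => a.2 + 2 ≤ b.1) := by
      rw [List.pairwise_append]
      refine ⟨h3, List.pairwise_singleton .., ?_⟩
      intro a ha b hb; rw [List.mem_singleton] at hb; subst hb; exact h4 a ha
    have hcovm : ∀ x : Int, x ∈ tp.foldl (pvWindowAdd window) PySem.Set.empty ↔
        ∃ t ∈ done' ++ [cur'], t.1 ≤ x ∧ x ≤ t.2 := by
      intro x
      rw [hcov x, h5 x]
      constructor
      · rintro ⟨t, ht, h⟩
        rw [← hmemS t] at ht
        rcases List.mem_cons.mp ht with rfl | ht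
        · exact Or.inl ⟨t, by simp, h⟩
        · exact Or.inr ⟨t, ht, h⟩
      · rintro (⟨t, ht, h⟩ | ⟨t, ht, h⟩)
        · simp only [List.nil_append, List.mem_singleton] at ht
          rw [ht] at h
          exact ⟨t0, (hmemS t0).mp (List.mem_cons_self ..), h⟩
        · exact ⟨t, (hmemS t).mp (List.mem_cons_of_mem _ ht), h⟩
    -- A's sorted page list is exactly the flattening of the merged intervals
    have hpages : PySem.List.sorted (tp.foldl (pvWindowAdd window) PySem.Set.empty) (fun x => x) false
        = pvFlat (done' ++ [cur']) := by
      apply PySem.List.sorted_eq_of_perm_of_pairwise_lt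
      · rw [List.perm_ext_iff_of_nodup
          ((pv_flat_pairwise _ hvm hsm).imp (fun h => ne_of_lt h))
          (pv_nodup_selected tp window PySem.Set.empty (List.nodup_nil))]
        intro a
        rw [pv_mem_flat, hcovm a]
      · exact pv_flat_pairwise _ hvm hsm
    -- unpack the head of the merged list
    obtain ⟨m0, mrest, hm⟩ : ∃ m0 mrest, done' ++ [cur'] = m0 :: mrest := by
      cases done' with
      | nil => exact ⟨cur', [], rfl⟩
      | cons d ds => exact ⟨d, ds ++ [cur'], rfl⟩
    have hvm0 : m0.1 ≤ m0.2 := hvm m0 (hm ▸ List.mem_cons_self ..)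
    have hflatcons : pvFlat (done' ++ [cur'])
        = m0.1 :: (PySem.List.pyRange (m0.1 + 1) (m0.2 + 1) 1 ++ pvFlat mrest) := by
      rw [hm]
      show PySem.List.pyRange m0.1 (m0.2 + 1) 1 ++ pvFlat mrest = _
      rw [PySem.List.pyRange_one_cons (by omega)]
      simp
    -- selected is nonempty
    have hselne : tp.foldl (pvWindowAdd window) PySem.Set.empty ≠ [] := by
      intro hnil
      have : m0.1 ∈ tp.foldl (pvWindowAdd window) PySem.Set.empty :=
        (hcovm m0.1).mpr ⟨m0, hm ▸ List.mem_cons_self .., le_refl _, hvm0⟩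
      rw [hnil] at this
      simp at this
    -- reduce A
    have hA : make_marker_page_range tp window
        = PySem.Str.join "," ((done' ++ [cur']).map pvEmit) := by
      unfold make_marker_page_range
      dsimp only
      rw [if_neg hselne, hpages, hflatcons]
      dsimp only
      rw [List.foldl_append]
      rw [show (m0.2 + 1 : Int) = m0.1 + 1 + ((m0.2 - m0.1).toNat : Int) by omega]
      rw [pv_run (m0.2 - m0.1).toNat [] m0.1 m0.1]
      rw [show (m0.1 + ((m0.2 - m0.1).toNat : Int)) = m0.2 by omega]
      have hcf := pv_compress_flat mrest [] m0.1 m0.2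
        (fun u hu => hvm u (hm ▸ List.mem_cons_of_mem _ hu))
        (hm ▸ hsm).tail
        (fun u hu => (List.pairwise_cons.mp (hm ▸ hsm)).1 u hu)
      simp only [] at hcf ⊢
      rw [hcf, hm]
      have hemit : pvEmit m0 = pvFmt m0.1 m0.2 := rfl
      simp [hemit]
    -- reduce B
    have hB : make_marker_page_range_alt tp window
        = PySem.Str.join "," ((done' ++ [cur']).map pvEmit) := by
      unfold make_marker_page_range_alt
      dsimp only
      rw [hSI, List.foldl_cons
        , show pvMergeStep (([] : List (Int × Int)), (none : Option (Int × Int))) t0 = ([], some t0) from rfl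
        , heq]
    rw [hA, hB]
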